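-- pv_equiv track=rewrite | github.com/C2SP/wycheproof | src/nimber.py | nim_mul
-- ===== SOURCE A (Python) =====
-- def nim_mul(x, y):
--   '''Multiplies to nimbers.
--   >>> nim_mul(123, 12345)
--   35336
--
--   1 is the neutral element of the multiplication
--   >>> nim_mul(1, 123)
--   123
--
--   Multiplication is distributive
--   >>> nim_mul(23 ^ 67, 123) == nim_mul(23, 123) ^ nim_mul(67, 123)
--   True
--   '''
--   if x > y: x,y = y,x
--   if x == 0: return 0
--   if x == 1: return y
--   k = (y.bit_length() - 1).bit_length() - 1
--   B = 1 << (2**k)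
--   yh, yl = divmod(y, B)
--   if x < B:
--     return nim_mul(x, yh) * B ^ nim_mul(x, yl)
--   else:
--      xh, xl = divmod(x, B)
--      w = B // 2
--      # compute (xh*B + xl)(yh*B + yl)
--      # using Karatsuba and B^2 = B+w
--      rh = nim_mul(xh, yh)
--      rm = nim_mul(xl ^ xh, yl ^ yh)
--      rl = nim_mul(xl, yl)
--      hi = rm ^ rl
--      lo = rl ^ nim_mul(rh, w)
--      return (hi * B) ^ lo
-- ===== SOURCE B (Python) =====
-- def nim_mul(x, y):
--   '''Multiplies two nimbers, memoizing shared subproducts (dynamic programming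
--   over the pairs reached by the Fermat-power split) instead of recomputing them.'''
--   cache = {}
--   def mul(x, y):
--     if x > y:
--       x, y = y, x
--     if x == 0:
--       return 0
--     if x == 1:
--       return y
--     r = cache.get((x, y))
--     if r is not None:
--       return r
--     k = (y.bit_length() - 1).bit_length() - 1
--     s = 1 << k
--     B = 1 << s
--     yh, yl = y >> s, y & (B - 1)
--     if x < B:
--       r = mul(x, yh) * B ^ mul(x, yl)
--     else:
--       xh, xl = x >> s, x & (B - 1)
--       rh = mul(xh, yh)
--       rm = mul(xh ^ xl, yh ^ yl)
--       rl = mul(xl, yl)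
--       r = (rm ^ rl) * B ^ rl ^ mul(rh, B >> 1)
--     cache[(x, y)] = r
--     return r
--   return mul(x, y)
-- ===== Notes on version B (the rewrite author's own statement) =====
-- stated objective: alternative
-- what changed: B memoizes the Fermat-power recurrence in a dict keyed by the sorted argument pair (dynamic programming over the distinct subproducts, splitting with shifts/masks), where A recomputes every overlapping recursive subproduct.
import Mathlib
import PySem

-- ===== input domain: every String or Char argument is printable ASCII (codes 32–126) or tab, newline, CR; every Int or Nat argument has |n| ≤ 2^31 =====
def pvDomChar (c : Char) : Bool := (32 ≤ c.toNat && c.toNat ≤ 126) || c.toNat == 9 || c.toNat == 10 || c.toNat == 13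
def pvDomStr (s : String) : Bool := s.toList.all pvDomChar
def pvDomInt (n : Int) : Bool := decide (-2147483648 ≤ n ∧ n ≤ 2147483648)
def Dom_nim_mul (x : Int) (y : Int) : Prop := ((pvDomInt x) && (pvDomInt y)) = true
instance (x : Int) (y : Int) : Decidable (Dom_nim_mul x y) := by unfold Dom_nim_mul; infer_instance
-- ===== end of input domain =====

-- B replaces A's naive Fermat-power recursion by its memoized (dynamic-programming) version,
-- caching every computed subproduct in a dict keyed by the sorted argument pair; equivalence is
-- proved on nonnegative inputs (A raises on every negative one).

-- ===== PORT A =====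
-- A's recursion terminates because nimber products of values < 2^(2^k) stay < 2^(2^k); that fact is
-- not available to Lean's termination checker, so the port runs the transliterated body (nimAbody)
-- under a fuel counter which the proofs show is never exhausted on Pre_ (nimA_sufficient below).
-- 'none' models a Python exception (RecursionError / TypeError, reached only outside Pre_).
def nimAbody (rec : Int → Int → Option Int) (x : Int) (y : Int) : Option Int :=
  if x = 0 then some 0
  else if x = 1 then some y
  else
    -- k = (y.bit_length() - 1).bit_length() - 1
    let k : Int := (PySem.Int.bitLength ((PySem.Int.bitLength y : Int) - 1) : Int) - 1
    if k < 0 then none   -- Python: 1 << 2**k with k < 0 raises (reachable only outside Pre_)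
    else
      let B : Int := 2 ^ (2 ^ k.toNat)      -- B = 1 << (2**k)
      let yh := PySem.Int.floordiv y B
      let yl := PySem.Int.mod y B
      if x < B then
        match rec x yh, rec x yl with
        | some a, some b => some (PySem.Int.bxor (a * B) b)
        | _, _ => none
      else
        let xh := PySem.Int.floordiv x B
        let xl := PySem.Int.mod x B
        let w := PySem.Int.floordiv B 2
        match rec xh yh, rec (PySem.Int.bxor xl xh) (PySem.Int.bxor yl yh), rec xl yl with
        | some rh, some rm, some rl =>
          match rec rh w with
          | some s => some (PySem.Int.bxor (PySem.Int.bxor rm rl * B) (PySem.Int.bxor rl s))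
          | none => none
        | _, _, _ => none

def nimA : Nat → Int → Int → Option Int
  | 0, _, _ => none
  | f + 1, x, y =>
    -- if x > y: x,y = y,x
    if x > y then nimAbody (nimA f) y x else nimAbody (nimA f) x y

def nim_mul (x : Int) (y : Int) : Int := (nimA (x.natAbs + y.natAbs + 4) x y).getD 0

-- ===== PORT B =====
-- B's memo table maps a (sorted) argument pair to its nimber product; the body threads it through
-- every recursive call and is otherwise the transliteration of Source B's `mul`.
def nimBbody (rec : PySem.Dict (Int × Int) Int → Int → Int → Option (Int × PySem.Dict (Int × Int) Int))
    (c0 : PySem.Dict (Int × Int) Int) (x : Int) (y : Int) :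
    Option (Int × PySem.Dict (Int × Int) Int) :=
  if x = 0 then some (0, c0)
  else if x = 1 then some (y, c0)
  else
    match PySem.Dict.get? c0 (x, y) with
    | some r => some (r, c0)                    -- cache hit
    | none =>
      let k : Int := (PySem.Int.bitLength ((PySem.Int.bitLength y : Int) - 1) : Int) - 1
      if k < 0 then none                        -- Python: 1 << k with k < 0 raises
      else
        let s := 2 ^ k.toNat                    -- s = 1 << k
        let B : Int := Int.shiftLeft 1 s        -- B = 1 << s  (core's <<< on Int, Nat shift)
        let yh := Int.shiftRight y s
        let yl := PySem.Int.band y (B - 1)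
        let res :=
          if x < B then
            match rec c0 x yh with
            | some (a, c1) =>
              match rec c1 x yl with
              | some (b, c2) => some (PySem.Int.bxor (a * B) b, c2)
              | none => none
            | none => none
          else
            let xh := Int.shiftRight x s
            let xl := PySem.Int.band x (B - 1)
            match rec c0 xh yh with
            | some (rh, c1) =>
              match rec c1 (PySem.Int.bxor xh xl) (PySem.Int.bxor yh yl) with
              | some (rm, c2) =>
                match rec c2 xl yl with
                | some (rl, c3) =>
                  match rec c3 rh (Int.shiftRight B 1) with
                  | some (t, c4) =>
                    some (PySem.Int.bxor (PySem.Int.bxor (PySem.Int.bxor rm rl * B) rl) t, c4)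
                  | none => none
                | none => none
              | none => none
            | none => none
        match res with
        | some (r, c5) => some (r, PySem.Dict.insert c5 (x, y) r)   -- cache[(x, y)] = r
        | none => none

def nimB : Nat → PySem.Dict (Int × Int) Int → Int → Int → Option (Int × PySem.Dict (Int × Int) Int)
  | 0, _, _, _ => none
  | f + 1, c, x, y =>
    if x > y then nimBbody (nimB f) c y x else nimBbody (nimB f) c x y

def nim_mul_alt (x : Int) (y : Int) : Int :=
  match nimB (x.natAbs + y.natAbs + 4) PySem.Dict.empty x y with
  | some (r, _) => r
  | none => 0

-- ===== PRECONDITION & SPEC =====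
-- A recurses forever (RecursionError) or hits '1 << 2**-1' (TypeError) whenever an argument is
-- negative; Pre_ keeps exactly the nonnegative inputs, on which A always returns.
def Pre_nim_mul (x : Int) (y : Int) : Prop := 0 ≤ x ∧ 0 ≤ y
instance (x : Int) (y : Int) : Decidable (Pre_nim_mul x y) := by unfold Pre_nim_mul; infer_instance
def pvWitness_nim_mul : Int × Int := (123, 12345)

def Spec_nim_mul (x : Int) (y : Int) (out : Int) : Prop := out = nim_mul_alt x y
instance (x : Int) (y : Int) (out : Int) : Decidable (Spec_nim_mul x y out) := by unfold Spec_nim_mul; infer_instance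

-- ===== CLAIM (what is proved, stated in full; the proofs are below) =====
def Claim_equal_nim_mul : Prop := ∀ (x : Int) (y : Int), Dom_nim_mul x y → Pre_nim_mul x y → Spec_nim_mul x y (nim_mul x y)

-- ===== LEMMAS AND PROOFS =====

-- A's first line swaps the arguments, so the fuel evaluator is symmetric.
theorem nimA_swap (f : Nat) (x y : Int) : nimA f x y = nimA f y x := by
  cases f with
  | zero => rfl
  | succ f =>
    simp only [nimA]
    rcases lt_trichotomy x y with h | h | h
    · simp [not_lt.mpr h.le, h]
    · simp [h]
    · simp [not_lt.mpr h.le, h]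

-- the memo-table invariant of B
def CacheOK (c : PySem.Dict (Int × Int) Int) : Prop :=
  ∀ a b v, PySem.Dict.get? c (a, b) = some v → 0 ≤ a ∧ 0 ≤ b ∧ v = nim_mul a b

-- casting / power helpers -------------------------------------------------

theorem pvPowCast (n : Nat) : ((2 ^ n : Nat) : Int) = 2 ^ n := by push_cast; ring

theorem pvPwMono {a b : Nat} (h : a ≤ b) : (2 : Int) ^ 2 ^ a ≤ 2 ^ 2 ^ b := by
  apply pow_le_pow_right₀ (by norm_num)
  exact Nat.pow_le_pow_right (by norm_num) h

theorem pvBsq (k : Nat) : (2 : Int) ^ 2 ^ k * 2 ^ 2 ^ k = 2 ^ 2 ^ (k + 1) := by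
  rw [← pow_add]
  congr 1
  rw [Nat.pow_succ]
  omega

theorem pvToNatLt {a : Int} {n : Nat} (ha : 0 ≤ a) (h : a < 2 ^ n) : a.toNat < 2 ^ n := by
  have := pvPowCast n
  omega

-- xor of nonnegative ints: nonneg and bounded by any common power-of-two bound
theorem pvBxorBounds {a b : Int} {n : Nat} (ha0 : 0 ≤ a) (hb0 : 0 ≤ b)
    (ha : a < 2 ^ n) (hb : b < 2 ^ n) :
    0 ≤ PySem.Int.bxor a b ∧ PySem.Int.bxor a b < 2 ^ n := by
  rw [PySem.Int.bxor_of_nonneg ha0 hb0]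
  refine ⟨Int.natCast_nonneg _, ?_⟩
  have hx : a.toNat ^^^ b.toNat < 2 ^ n :=
    Nat.xor_lt_two_pow (pvToNatLt ha0 ha) (pvToNatLt hb0 hb)
  have := pvPowCast n
  omega

theorem pvBxorAssoc {a b c : Int} (ha : 0 ≤ a) (hb : 0 ≤ b) (hc : 0 ≤ c) :
    PySem.Int.bxor (PySem.Int.bxor a b) c = PySem.Int.bxor a (PySem.Int.bxor b c) := by
  obtain ⟨n, rfl⟩ := Int.eq_ofNat_of_zero_le ha
  obtain ⟨m, rfl⟩ := Int.eq_ofNat_of_zero_le hb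
  obtain ⟨p, rfl⟩ := Int.eq_ofNat_of_zero_le hc
  simp only [PySem.Int.bxor_natCast]
  rw [Nat.xor_assoc]

-- shifts and masks on nonnegative ints are floordiv / mod by the power of two
theorem pvShlOne (s : Nat) : Int.shiftLeft 1 s = 2 ^ s := by
  have h1 : Int.shiftLeft 1 s = Int.ofNat (1 <<< s) := rfl
  rw [h1, Nat.shiftLeft_eq, one_mul]
  exact pvPowCast s

theorem pvShrFloordiv {z : Int} (hz : 0 ≤ z) (s : Nat) :
    Int.shiftRight z s = PySem.Int.floordiv z (2 ^ s) := by
  obtain ⟨n, rfl⟩ := Int.eq_ofNat_of_zero_le hz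
  have h1 : Int.shiftRight ((n : Nat) : Int) s = ((n >>> s : Nat) : Int) := rfl
  rw [h1, Nat.shiftRight_eq_div_pow]
  rw [show ((2 : Int) ^ s) = ((2 ^ s : Nat) : Int) from (pvPowCast s).symm]
  simp

theorem pvBandMod {z : Int} (hz : 0 ≤ z) (s : Nat) :
    PySem.Int.band z (2 ^ s - 1) = PySem.Int.mod z (2 ^ s) := by
  obtain ⟨n, rfl⟩ := Int.eq_ofNat_of_zero_le hz
  have h2 : ((2 : Int) ^ s - 1) = ((2 ^ s - 1 : Nat) : Int) := by
    have := pvPowCast s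
    have h1 : 1 ≤ 2 ^ s := Nat.one_le_two_pow
    omega
  rw [h2, PySem.Int.band_natCast, Nat.and_two_pow_sub_one_eq_mod]
  rw [show ((2 : Int) ^ s) = ((2 ^ s : Nat) : Int) from (pvPowCast s).symm]
  simp

-- the split level computed by both programs -------------------------------
-- For 2 <= x <= y < 2^(2^K), the expression (y.bit_length()-1).bit_length()-1 is a Nat kk < K
-- with 2^(2^kk) <= y < 2^(2^(kk+1)).
theorem pvSplitLevel {K : Nat} {x y : Int} (h2 : 2 ≤ x) (hxy : x ≤ y) (hyK : y < 2 ^ 2 ^ K) :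
    ∃ kk : Nat,
      (PySem.Int.bitLength ((PySem.Int.bitLength y : Int) - 1) : Int) - 1 = (kk : Int) ∧
      kk < K ∧ (2 : Int) ^ 2 ^ kk ≤ y ∧ y < 2 ^ 2 ^ (kk + 1) := by
  have hy2 : (2 : Int) ≤ y := le_trans h2 hxy
  have hylow : 2 ^ (PySem.Int.bitLength y - 1) ≤ y.natAbs :=
    PySem.Int.two_pow_bitLength_le y (by omega)
  have hyhigh : y.natAbs < 2 ^ PySem.Int.bitLength y := PySem.Int.lt_two_pow_bitLength y
  set bl := PySem.Int.bitLength y with hbl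
  have hbl2 : 2 ≤ bl := by
    by_contra hc
    have h1 : y.natAbs < 2 ^ 1 := lt_of_lt_of_le hyhigh (Nat.pow_le_pow_right (by norm_num) (by omega))
    omega
  set m := bl - 1 with hm
  have hcast : ((bl : Int) - 1) = (m : Int) := by omega
  rw [hcast]
  have hmlow : 2 ^ (PySem.Int.bitLength (m : Int) - 1) ≤ m := by
    have := PySem.Int.two_pow_bitLength_le (m : Int) (by simp; omega)
    simpa using this
  have hmhigh : m < 2 ^ PySem.Int.bitLength (m : Int) := by
    simpa using PySem.Int.lt_two_pow_bitLength (m : Int)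
  set bl2 := PySem.Int.bitLength (m : Int) with hbl2d
  have hbl2pos : 1 ≤ bl2 := by
    rcases Nat.eq_zero_or_pos bl2 with h | h
    · rw [h] at hmhigh; omega
    · exact h
  refine ⟨bl2 - 1, by omega, ?_, ?_, ?_⟩
  · -- bl2 - 1 < K
    have h1 : y.natAbs < 2 ^ 2 ^ K := by
      have := pvPowCast (2 ^ K)
      omega
    have h2' : (2 : Nat) ^ m < 2 ^ 2 ^ K := lt_of_le_of_lt hylow h1
    have hmK : m < 2 ^ K := (Nat.pow_lt_pow_iff_right (by norm_num)).mp h2'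
    have h3 : (2 : Nat) ^ (bl2 - 1) < 2 ^ K := lt_of_le_of_lt hmlow hmK
    exact (Nat.pow_lt_pow_iff_right (by norm_num)).mp h3
  · -- 2^(2^(bl2-1)) <= y
    have h1 : (2 : Nat) ^ 2 ^ (bl2 - 1) ≤ 2 ^ m := Nat.pow_le_pow_right (by norm_num) hmlow
    have h2' : (2 : Nat) ^ 2 ^ (bl2 - 1) ≤ y.natAbs := le_trans h1 hylow
    have := pvPowCast (2 ^ (bl2 - 1))
    omega
  · -- y < 2^(2^(bl2-1+1))
    have h1 : y.natAbs < 2 ^ (m + 1) := by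
      have : m + 1 = bl := by omega
      rw [this]; exact hyhigh
    have h2' : m + 1 ≤ 2 ^ (bl2 - 1 + 1) := by
      have : bl2 - 1 + 1 = bl2 := by omega
      rw [this]; omega
    have h3 : y.natAbs < 2 ^ 2 ^ (bl2 - 1 + 1) :=
      lt_of_lt_of_le h1 (Nat.pow_le_pow_right (by norm_num) h2')
    have := pvPowCast (2 ^ (bl2 - 1 + 1))
    omega

-- bounds for the divmod split by B = 2^(2^kk) ------------------------------
theorem pvDivmodBounds {z : Int} {kk : Nat} (hz : 0 ≤ z) (hzB2 : z < 2 ^ 2 ^ (kk + 1)) :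
    0 ≤ PySem.Int.floordiv z (2 ^ 2 ^ kk) ∧ PySem.Int.floordiv z (2 ^ 2 ^ kk) < 2 ^ 2 ^ kk ∧
    0 ≤ PySem.Int.mod z (2 ^ 2 ^ kk) ∧ PySem.Int.mod z (2 ^ 2 ^ kk) < 2 ^ 2 ^ kk := by
  have hBpos : (0 : Int) < 2 ^ 2 ^ kk := by positivity
  refine ⟨?_, ?_, PySem.Int.mod_nonneg _ hBpos, PySem.Int.mod_lt _ hBpos⟩
  · rw [PySem.Int.floordiv_eq_ediv_of_pos hBpos]
    exact Int.ediv_nonneg hz (le_of_lt hBpos)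
  · rw [PySem.Int.floordiv_lt_iff_lt_mul hBpos, pvBsq]
    exact hzB2

-- A: monotonicity in the callee ------------------------------------------
theorem nimAbody_mono {g g' : Int → Int → Option Int}
    (hg : ∀ x y r, g x y = some r → g' x y = some r) :
    ∀ x y r, nimAbody g x y = some r → nimAbody g' x y = some r := by
  intro x y r h
  simp only [nimAbody] at h ⊢
  split_ifs at h ⊢ with h0 h1 hk hxB
  · exact h
  · exact h
  · cases hA : g x (PySem.Int.floordiv y (2 ^ 2 ^ (((PySem.Int.bitLength ((PySem.Int.bitLength y : Int) - 1) : Int) - 1).toNat))) with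
    | none => rw [hA] at h; simp at h
    | some a =>
      cases hB : g x (PySem.Int.mod y (2 ^ 2 ^ (((PySem.Int.bitLength ((PySem.Int.bitLength y : Int) - 1) : Int) - 1).toNat))) with
      | none => rw [hA, hB] at h; simp at h
      | some b =>
        rw [hA, hB] at h
        rw [hg _ _ _ hA, hg _ _ _ hB]
        exact h
  · cases hA : g (PySem.Int.floordiv x (2 ^ 2 ^ (((PySem.Int.bitLength ((PySem.Int.bitLength y : Int) - 1) : Int) - 1).toNat))) (PySem.Int.floordiv y (2 ^ 2 ^ (((PySem.Int.bitLength ((PySem.Int.bitLength y : Int) - 1) : Int) - 1).toNat))) with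
    | none => rw [hA] at h; simp at h
    | some rh =>
      cases hB : g (PySem.Int.bxor (PySem.Int.mod x (2 ^ 2 ^ (((PySem.Int.bitLength ((PySem.Int.bitLength y : Int) - 1) : Int) - 1).toNat))) (PySem.Int.floordiv x (2 ^ 2 ^ (((PySem.Int.bitLength ((PySem.Int.bitLength y : Int) - 1) : Int) - 1).toNat)))) (PySem.Int.bxor (PySem.Int.mod y (2 ^ 2 ^ (((PySem.Int.bitLength ((PySem.Int.bitLength y : Int) - 1) : Int) - 1).toNat))) (PySem.Int.floordiv y (2 ^ 2 ^ (((PySem.Int.bitLength ((PySem.Int.bitLength y : Int) - 1) : Int) - 1).toNat)))) with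
      | none => rw [hA, hB] at h; simp at h
      | some rm =>
        cases hC : g (PySem.Int.mod x (2 ^ 2 ^ (((PySem.Int.bitLength ((PySem.Int.bitLength y : Int) - 1) : Int) - 1).toNat))) (PySem.Int.mod y (2 ^ 2 ^ (((PySem.Int.bitLength ((PySem.Int.bitLength y : Int) - 1) : Int) - 1).toNat))) with
        | none => rw [hA, hB, hC] at h; simp at h
        | some rl =>
          rw [hA, hB, hC] at h
          simp only at h
          cases hD : g rh (PySem.Int.floordiv (2 ^ 2 ^ (((PySem.Int.bitLength ((PySem.Int.bitLength y : Int) - 1) : Int) - 1).toNat)) 2) with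
          | none => rw [hD] at h; simp at h
          | some s =>
            rw [hD] at h
            simp only at h
            rw [hg _ _ _ hA, hg _ _ _ hB, hg _ _ _ hC]
            simp only
            rw [hg _ _ _ hD]
            simp only
            exact h
theorem nimA_mono (f : Nat) : ∀ (f' : Nat), f ≤ f' → ∀ x y r,
    nimA f x y = some r → nimA f' x y = some r := by
  induction f with
  | zero => intro f' _ x y r h; simp [nimA] at h
  | succ f ih =>
    intro f' hf x y r h
    obtain ⟨f'', rfl⟩ : ∃ g, f' = g + 1 := ⟨f' - 1, by omega⟩
    have hrec : ∀ a b r', nimA f a b = some r' → nimA f'' a b = some r' :=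
      fun a b r' h' => ih f'' (by omega) a b r' h'
    simp only [nimA] at h ⊢
    split_ifs at h ⊢ with hxy
    · exact nimAbody_mono hrec _ _ _ h
    · exact nimAbody_mono hrec _ _ _ h

-- A: sufficiency of the fuel + closure of the result ----------------------
theorem nimAbody_suff {g : Int → Int → Option Int} {K : Nat}
    (hg : ∀ k, k < K → ∀ x y, 0 ≤ x → 0 ≤ y → x < 2 ^ 2 ^ k → y < 2 ^ 2 ^ k →
      ∃ r, g x y = some r ∧ 0 ≤ r ∧ r < 2 ^ 2 ^ k)
    {x y : Int} (hx : 0 ≤ x) (hxy : x ≤ y) (hy : y < 2 ^ 2 ^ K) :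
    ∃ r, nimAbody g x y = some r ∧ 0 ≤ r ∧ r < 2 ^ 2 ^ K := by
  by_cases h0 : x = 0
  · exact ⟨0, by simp [nimAbody, h0], le_refl 0, by positivity⟩
  by_cases h1 : x = 1
  · exact ⟨y, by simp [nimAbody, h1], by omega, hy⟩
  have h2 : 2 ≤ x := by omega
  obtain ⟨kk, hkeq, hkK, hBy, hyB2⟩ := pvSplitLevel h2 hxy hy
  have hy0 : 0 ≤ y := by omega
  have hkk0 : ¬ ((kk : Int) < 0) := by omega
  have hBx2 : x < 2 ^ 2 ^ (kk + 1) := lt_of_le_of_lt hxy hyB2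
  obtain ⟨hyh0, hyhB, hyl0, hylB⟩ := pvDivmodBounds hy0 hyB2
  have hBK : (2 : Int) ^ 2 ^ (kk + 1) ≤ 2 ^ 2 ^ K := pvPwMono (by omega)
  have hBpos : (0 : Int) < 2 ^ 2 ^ kk := by positivity
  have hB1 : (1 : Int) ≤ 2 ^ 2 ^ kk := by omega
  by_cases hxB : x < 2 ^ 2 ^ kk
  · obtain ⟨a, hA, ha0, haB⟩ := hg kk hkK x _ hx hyh0 hxB hyhB
    obtain ⟨b, hB, hb0, hbB⟩ := hg kk hkK x _ hx hyl0 hxB hylB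
    have hres := pvBxorBounds (a := a * 2 ^ 2 ^ kk) (b := b) (n := 2 ^ (kk + 1))
      (mul_nonneg ha0 (le_of_lt hBpos))
      hb0 (by rw [← pvBsq]; exact mul_lt_mul_of_pos_right haB hBpos)
      (lt_of_lt_of_le hbB (by rw [← pvBsq]; nlinarith [hB1]))
    refine ⟨_, ?_, hres.1, lt_of_lt_of_le hres.2 hBK⟩
    simp only [nimAbody, hkeq, if_neg h0, if_neg h1, if_neg hkk0, Int.toNat_natCast]
    rw [if_pos hxB, hA, hB]
  · obtain ⟨hxh0, hxhB, hxl0, hxlB⟩ := pvDivmodBounds hx hBx2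
    have hm0 := pvBxorBounds hxl0 hxh0 hxlB hxhB
    have hm1 := pvBxorBounds hyl0 hyh0 hylB hyhB
    obtain ⟨rh, hA, hrh0, hrhB⟩ := hg kk hkK _ _ hxh0 hyh0 hxhB hyhB
    obtain ⟨rm, hB, hrm0, hrmB⟩ := hg kk hkK _ _ hm0.1 hm1.1 hm0.2 hm1.2
    obtain ⟨rl, hC, hrl0, hrlB⟩ := hg kk hkK _ _ hxl0 hyl0 hxlB hylB
    have hw0 : (0 : Int) ≤ PySem.Int.floordiv (2 ^ 2 ^ kk) 2 := by
      rw [PySem.Int.floordiv_eq_ediv_of_pos (by norm_num)]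
      exact Int.ediv_nonneg (by positivity) (by norm_num)
    have hwB : PySem.Int.floordiv (2 ^ 2 ^ kk) 2 < 2 ^ 2 ^ kk := by
      rw [PySem.Int.floordiv_lt_iff_lt_mul (by norm_num)]
      nlinarith [pow_pos (show (0:Int) < 2 by norm_num) (2 ^ kk)]
    obtain ⟨s, hD, hs0, hsB⟩ := hg kk hkK _ _ hrh0 hw0 hrhB hwB
    have hmid := pvBxorBounds hrm0 hrl0 hrmB hrlB
    have hlo := pvBxorBounds hrl0 hs0 hrlB hsB
    have hres := pvBxorBounds
      (a := PySem.Int.bxor rm rl * 2 ^ 2 ^ kk) (b := PySem.Int.bxor rl s) (n := 2 ^ (kk + 1))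
      (mul_nonneg hmid.1 (le_of_lt hBpos)) hlo.1
      (by rw [← pvBsq]; exact mul_lt_mul_of_pos_right hmid.2 hBpos)
      (lt_of_lt_of_le hlo.2 (by rw [← pvBsq]; nlinarith [hB1]))
    refine ⟨_, ?_, hres.1, lt_of_lt_of_le hres.2 hBK⟩
    simp only [nimAbody, hkeq, if_neg h0, if_neg h1, if_neg hkk0, Int.toNat_natCast]
    rw [if_neg hxB, hA, hB, hC]
    simp only
    rw [hD]

theorem nimA_sufficient (f : Nat) : ∀ (k : Nat) (x y : Int), 0 ≤ x → 0 ≤ y →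
    x < 2 ^ 2 ^ k → y < 2 ^ 2 ^ k → k + 1 ≤ f →
    ∃ r, nimA f x y = some r ∧ 0 ≤ r ∧ r < 2 ^ 2 ^ k := by
  induction f with
  | zero => intro k x y _ _ _ _ hf; omega
  | succ f ih =>
    intro k x y hx hy hxk hyk hf
    have hg : ∀ k', k' < k → ∀ a b, 0 ≤ a → 0 ≤ b → a < 2 ^ 2 ^ k' → b < 2 ^ 2 ^ k' →
        ∃ r, nimA f a b = some r ∧ 0 ≤ r ∧ r < 2 ^ 2 ^ k' :=
      fun k' hk' a b ha hb hak hbk => ih k' a b ha hb hak hbk (by omega)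
    simp only [nimA]
    split_ifs with hxy
    · exact nimAbody_suff hg hy (le_of_lt hxy) hxk
    · exact nimAbody_suff hg hx (not_lt.mp hxy) hyk

-- every successful run computes nim_mul ----------------------------------
theorem pvSelfBound (x y : Int) (hx : 0 ≤ x) :
    x < 2 ^ 2 ^ (x.natAbs + y.natAbs + 3) := by
  set k := x.natAbs + y.natAbs + 3 with hk
  have h1 : k < 2 ^ k := Nat.lt_two_pow_self
  have h2 : (2 : Nat) ^ k ≤ 2 ^ 2 ^ k := Nat.pow_le_pow_right (by norm_num) (by omega)
  have := pvPowCast (2 ^ k)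
  omega

theorem nimA_eq_nim_mul {f : Nat} {x y r : Int} (hx : 0 ≤ x) (hy : 0 ≤ y)
    (h : nimA f x y = some r) : r = nim_mul x y := by
  set k := x.natAbs + y.natAbs + 3 with hk
  have hxk : x < 2 ^ 2 ^ k := pvSelfBound x y hx
  have hyk : y < 2 ^ 2 ^ k := by
    have := pvSelfBound y x hy
    rw [show y.natAbs + x.natAbs + 3 = k from by omega] at this
    exact this
  obtain ⟨r', hr', _, _⟩ := nimA_sufficient (k + 1) k x y hx hy hxk hyk (le_refl _)
  have hfuel : x.natAbs + y.natAbs + 4 = k + 1 := by omega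
  have h1 := nimA_mono f (max f (k + 1)) (le_max_left _ _) _ _ _ h
  have h2 := nimA_mono (k + 1) (max f (k + 1)) (le_max_right _ _) _ _ _ hr'
  rw [h1] at h2
  unfold nim_mul
  rw [hfuel, hr']
  simp at h2 ⊢
  omega

theorem nim_mul_comm (x y : Int) : nim_mul x y = nim_mul y x := by
  unfold nim_mul
  rw [show x.natAbs + y.natAbs = y.natAbs + x.natAbs from Nat.add_comm _ _, nimA_swap]

theorem nim_mul_bound {k : Nat} {a b : Int} (ha : 0 ≤ a) (hb : 0 ≤ b)
    (hak : a < 2 ^ 2 ^ k) (hbk : b < 2 ^ 2 ^ k) :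
    0 ≤ nim_mul a b ∧ nim_mul a b < 2 ^ 2 ^ k := by
  obtain ⟨r, hr, h0, h1⟩ := nimA_sufficient (k + 1) k a b ha hb hak hbk (le_refl _)
  rw [← nimA_eq_nim_mul ha hb hr]
  exact ⟨h0, h1⟩

theorem nim_mul_zero {y : Int} (hy : 0 ≤ y) : nim_mul 0 y = 0 := by
  unfold nim_mul
  rw [show (0 : Int).natAbs + y.natAbs + 4 = (y.natAbs + 3) + 1 from by simp]
  simp [nimA, nimAbody, not_lt.mpr hy]

theorem nim_mul_one {y : Int} (hy : 1 ≤ y) : nim_mul 1 y = y := by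
  unfold nim_mul
  rw [show (1 : Int).natAbs + y.natAbs + 4 = (y.natAbs + 4) + 1 from by simp; omega]
  have : ¬ ((1 : Int) > y) := by omega
  simp [nimA, nimAbody, this]

theorem nimA_succ (f : Nat) (x y : Int) :
    nimA (f + 1) x y = if x > y then nimAbody (nimA f) y x else nimAbody (nimA f) x y := rfl

-- unfolding nim_mul one recursion step (the two branches of A) ------------
theorem nim_mul_unfold_low {x y : Int} {kk : Nat} (h2 : 2 ≤ x) (hxy : x ≤ y)
    (hkeq : (PySem.Int.bitLength ((PySem.Int.bitLength y : Int) - 1) : Int) - 1 = (kk : Int))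
    (hyB2 : y < 2 ^ 2 ^ (kk + 1)) (hxB : x < 2 ^ 2 ^ kk) :
    nim_mul x y = PySem.Int.bxor
      (nim_mul x (PySem.Int.floordiv y (2 ^ 2 ^ kk)) * 2 ^ 2 ^ kk)
      (nim_mul x (PySem.Int.mod y (2 ^ 2 ^ kk))) := by
  have hx : (0 : Int) ≤ x := by omega
  have hy : (0 : Int) ≤ y := by omega
  obtain ⟨hyh0, hyhB, hyl0, hylB⟩ := pvDivmodBounds hy hyB2
  obtain ⟨a, hA, _, _⟩ := nimA_sufficient (kk + 1) kk x _ hx hyh0 hxB hyhB (le_refl _)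
  obtain ⟨b, hB, _, _⟩ := nimA_sufficient (kk + 1) kk x _ hx hyl0 hxB hylB (le_refl _)
  have hstep : nimA (kk + 2) x y = some (PySem.Int.bxor (a * 2 ^ 2 ^ kk) b) := by
    rw [show kk + 2 = (kk + 1) + 1 from rfl, nimA_succ, if_neg (show ¬ x > y from by omega)]
    simp only [nimAbody, hkeq, if_neg (show ¬ x = 0 from by omega),
      if_neg (show ¬ x = 1 from by omega), if_neg (show ¬ ((kk : Int) < 0) from by omega),
      Int.toNat_natCast]
    rw [if_pos hxB, hA, hB]
  rw [← nimA_eq_nim_mul hx hy hstep,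
    ← nimA_eq_nim_mul hx hyh0 hA, ← nimA_eq_nim_mul hx hyl0 hB]

theorem nim_mul_unfold_high {x y : Int} {kk : Nat} (h2 : 2 ≤ x) (hxy : x ≤ y)
    (hkeq : (PySem.Int.bitLength ((PySem.Int.bitLength y : Int) - 1) : Int) - 1 = (kk : Int))
    (hyB2 : y < 2 ^ 2 ^ (kk + 1)) (hxB : ¬ x < 2 ^ 2 ^ kk) :
    nim_mul x y = PySem.Int.bxor
      (PySem.Int.bxor
        (nim_mul (PySem.Int.bxor (PySem.Int.mod x (2 ^ 2 ^ kk)) (PySem.Int.floordiv x (2 ^ 2 ^ kk)))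
                 (PySem.Int.bxor (PySem.Int.mod y (2 ^ 2 ^ kk)) (PySem.Int.floordiv y (2 ^ 2 ^ kk))))
        (nim_mul (PySem.Int.mod x (2 ^ 2 ^ kk)) (PySem.Int.mod y (2 ^ 2 ^ kk))) * 2 ^ 2 ^ kk)
      (PySem.Int.bxor
        (nim_mul (PySem.Int.mod x (2 ^ 2 ^ kk)) (PySem.Int.mod y (2 ^ 2 ^ kk)))
        (nim_mul (nim_mul (PySem.Int.floordiv x (2 ^ 2 ^ kk)) (PySem.Int.floordiv y (2 ^ 2 ^ kk)))
                 (PySem.Int.floordiv (2 ^ 2 ^ kk) 2))) := by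
  have hx : (0 : Int) ≤ x := by omega
  have hy : (0 : Int) ≤ y := by omega
  have hBx2 : x < 2 ^ 2 ^ (kk + 1) := lt_of_le_of_lt hxy hyB2
  obtain ⟨hyh0, hyhB, hyl0, hylB⟩ := pvDivmodBounds hy hyB2
  obtain ⟨hxh0, hxhB, hxl0, hxlB⟩ := pvDivmodBounds hx hBx2
  have hm0 := pvBxorBounds hxl0 hxh0 hxlB hxhB
  have hm1 := pvBxorBounds hyl0 hyh0 hylB hyhB
  obtain ⟨rh, hA, hrh0, hrhB⟩ := nimA_sufficient (kk + 1) kk _ _ hxh0 hyh0 hxhB hyhB (le_refl _)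
  obtain ⟨rm, hB, _, _⟩ := nimA_sufficient (kk + 1) kk _ _ hm0.1 hm1.1 hm0.2 hm1.2 (le_refl _)
  obtain ⟨rl, hC, _, _⟩ := nimA_sufficient (kk + 1) kk _ _ hxl0 hyl0 hxlB hylB (le_refl _)
  have hw0 : (0 : Int) ≤ PySem.Int.floordiv (2 ^ 2 ^ kk) 2 := by
    rw [PySem.Int.floordiv_eq_ediv_of_pos (by norm_num)]
    exact Int.ediv_nonneg (by positivity) (by norm_num)
  have hwB : PySem.Int.floordiv (2 ^ 2 ^ kk) 2 < 2 ^ 2 ^ kk := by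
    rw [PySem.Int.floordiv_lt_iff_lt_mul (by norm_num)]
    nlinarith [pow_pos (show (0:Int) < 2 by norm_num) (2 ^ kk)]
  obtain ⟨s, hD, _, _⟩ := nimA_sufficient (kk + 1) kk _ _ hrh0 hw0 hrhB hwB (le_refl _)
  have hstep : nimA (kk + 2) x y =
      some (PySem.Int.bxor (PySem.Int.bxor rm rl * 2 ^ 2 ^ kk) (PySem.Int.bxor rl s)) := by
    rw [show kk + 2 = (kk + 1) + 1 from rfl, nimA_succ, if_neg (show ¬ x > y from by omega)]
    simp only [nimAbody, hkeq, if_neg (show ¬ x = 0 from by omega),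
      if_neg (show ¬ x = 1 from by omega), if_neg (show ¬ ((kk : Int) < 0) from by omega),
      Int.toNat_natCast]
    rw [if_neg hxB, hA, hB, hC]
    simp only
    rw [hD]
  rw [← nimA_eq_nim_mul hx hy hstep, ← nimA_eq_nim_mul hm0.1 hm1.1 hB,
    ← nimA_eq_nim_mul hxl0 hyl0 hC, ← nimA_eq_nim_mul hxh0 hyh0 hA,
    ← nimA_eq_nim_mul hrh0 hw0 hD]

-- B: the body simulation ---------------------------------------------------
theorem nimBbody_sim {g : PySem.Dict (Int × Int) Int → Int → Int →
      Option (Int × PySem.Dict (Int × Int) Int)} {K : Nat}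
    (hg : ∀ k, k < K → ∀ c x y, CacheOK c → 0 ≤ x → 0 ≤ y → x < 2 ^ 2 ^ k → y < 2 ^ 2 ^ k →
      ∃ c', g c x y = some (nim_mul x y, c') ∧ CacheOK c')
    {c : PySem.Dict (Int × Int) Int} {x y : Int}
    (hc : CacheOK c) (hx : 0 ≤ x) (hxy : x ≤ y) (hy : y < 2 ^ 2 ^ K) :
    ∃ c', nimBbody g c x y = some (nim_mul x y, c') ∧ CacheOK c' := by
  have hy0 : (0 : Int) ≤ y := le_trans hx hxy
  by_cases h0 : x = 0
  · refine ⟨c, ?_, hc⟩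
    subst h0
    rw [nim_mul_zero hy0]
    simp [nimBbody]
  by_cases h1 : x = 1
  · refine ⟨c, ?_, hc⟩
    subst h1
    rw [nim_mul_one hxy]
    simp [nimBbody]
  have h2 : 2 ≤ x := by omega
  rcases hq : PySem.Dict.get? c (x, y) with _ | r
  · -- cache miss: recompute, then insert
    obtain ⟨kk, hkeq, hkK, hBy, hyB2⟩ := pvSplitLevel h2 hxy hy
    have hkk0 : ¬ ((kk : Int) < 0) := by omega
    have hBx2 : x < 2 ^ 2 ^ (kk + 1) := lt_of_le_of_lt hxy hyB2
    obtain ⟨hyh0, hyhB, hyl0, hylB⟩ := pvDivmodBounds hy0 hyB2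
    have hshl : Int.shiftLeft 1 (2 ^ kk : Nat) = (2 : Int) ^ 2 ^ kk := pvShlOne _
    have hins : ∀ c5 : PySem.Dict (Int × Int) Int, CacheOK c5 →
        CacheOK (PySem.Dict.insert c5 (x, y) (nim_mul x y)) := by
      intro c5 hc5 a b v hv
      rw [PySem.Dict.get?_insert] at hv
      split_ifs at hv with hab
      · obtain ⟨ha, hb⟩ := Prod.mk.injEq .. ▸ hab
        subst ha; subst hb
        exact ⟨hx, hy0, (Option.some.injEq .. ▸ hv).symm⟩
      · exact hc5 a b v hv
    by_cases hxB : x < 2 ^ 2 ^ kk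
    · obtain ⟨c1, hA, hc1⟩ := hg kk hkK c x _ hc hx hyh0 hxB hyhB
      obtain ⟨c2, hB, hc2⟩ := hg kk hkK c1 x _ hc1 hx hyl0 hxB hylB
      have hval : PySem.Int.bxor (nim_mul x (PySem.Int.floordiv y (2 ^ 2 ^ kk)) * 2 ^ 2 ^ kk)
          (nim_mul x (PySem.Int.mod y (2 ^ 2 ^ kk))) = nim_mul x y :=
        (nim_mul_unfold_low h2 hxy hkeq hyB2 hxB).symm
      refine ⟨_, ?_, hval ▸ hins c2 hc2⟩
      simp only [nimBbody, if_neg h0, if_neg h1, hq, hkeq, if_neg hkk0, Int.toNat_natCast,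
        hshl, pvShrFloordiv hy0, pvBandMod hy0]
      rw [if_pos hxB, hA]
      simp only
      rw [hB]
      simp only
      rw [hval]
    · obtain ⟨hxh0, hxhB, hxl0, hxlB⟩ := pvDivmodBounds hx hBx2
      have hm0 := pvBxorBounds hxh0 hxl0 hxhB hxlB
      have hm1 := pvBxorBounds hyh0 hyl0 hyhB hylB
      obtain ⟨c1, hA, hc1⟩ := hg kk hkK c _ _ hc hxh0 hyh0 hxhB hyhB
      obtain ⟨c2, hB, hc2⟩ := hg kk hkK c1 _ _ hc1 hm0.1 hm1.1 hm0.2 hm1.2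
      obtain ⟨c3, hC, hc3⟩ := hg kk hkK c2 _ _ hc2 hxl0 hyl0 hxlB hylB
      have hrhp := nim_mul_bound hxh0 hyh0 hxhB hyhB
      have hw0 : (0 : Int) ≤ PySem.Int.floordiv (2 ^ 2 ^ kk) 2 := by
        rw [PySem.Int.floordiv_eq_ediv_of_pos (by norm_num)]
        exact Int.ediv_nonneg (by positivity) (by norm_num)
      have hwB : PySem.Int.floordiv (2 ^ 2 ^ kk) 2 < 2 ^ 2 ^ kk := by
        rw [PySem.Int.floordiv_lt_iff_lt_mul (by norm_num)]
        nlinarith [pow_pos (show (0:Int) < 2 by norm_num) (2 ^ kk)]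
      obtain ⟨c4, hD, hc4⟩ := hg kk hkK c3 _ _ hc3 hrhp.1 hw0 hrhp.2 hwB
      have hwE : Int.shiftRight ((2 : Int) ^ 2 ^ kk) 1 = PySem.Int.floordiv (2 ^ 2 ^ kk) 2 := by
        rw [pvShrFloordiv (by positivity) 1]
        norm_num
      have hmidb := nim_mul_bound hm0.1 hm1.1 hm0.2 hm1.2
      have hrlb := nim_mul_bound hxl0 hyl0 hxlB hylB
      have htb := nim_mul_bound hrhp.1 hw0 hrhp.2 hwB
      have hval : PySem.Int.bxor (PySem.Int.bxor (PySem.Int.bxor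
            (nim_mul (PySem.Int.bxor (PySem.Int.floordiv x (2 ^ 2 ^ kk)) (PySem.Int.mod x (2 ^ 2 ^ kk)))
                     (PySem.Int.bxor (PySem.Int.floordiv y (2 ^ 2 ^ kk)) (PySem.Int.mod y (2 ^ 2 ^ kk))))
            (nim_mul (PySem.Int.mod x (2 ^ 2 ^ kk)) (PySem.Int.mod y (2 ^ 2 ^ kk))) * 2 ^ 2 ^ kk)
            (nim_mul (PySem.Int.mod x (2 ^ 2 ^ kk)) (PySem.Int.mod y (2 ^ 2 ^ kk))))
            (nim_mul (nim_mul (PySem.Int.floordiv x (2 ^ 2 ^ kk)) (PySem.Int.floordiv y (2 ^ 2 ^ kk)))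
                     (PySem.Int.floordiv (2 ^ 2 ^ kk) 2)) = nim_mul x y := by
        rw [pvBxorAssoc (mul_nonneg (pvBxorBounds hmidb.1 hrlb.1 hmidb.2 hrlb.2).1
            (show (0:Int) ≤ 2 ^ 2 ^ kk by positivity)) hrlb.1 htb.1,
          PySem.Int.bxor_comm (PySem.Int.floordiv x (2 ^ 2 ^ kk)) (PySem.Int.mod x (2 ^ 2 ^ kk)),
          PySem.Int.bxor_comm (PySem.Int.floordiv y (2 ^ 2 ^ kk)) (PySem.Int.mod y (2 ^ 2 ^ kk))]
        exact (nim_mul_unfold_high h2 hxy hkeq hyB2 hxB).symm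
      refine ⟨_, ?_, hval ▸ hins c4 hc4⟩
      simp only [nimBbody, if_neg h0, if_neg h1, hq, hkeq, if_neg hkk0, Int.toNat_natCast,
        hshl, pvShrFloordiv hy0, pvBandMod hy0, pvShrFloordiv hx, pvBandMod hx, hwE]
      rw [if_neg hxB, hA]
      simp only
      rw [hB]
      simp only
      rw [hC]
      simp only
      rw [hD]
      simp only
      rw [hval]
  · -- cache hit
    obtain ⟨_, _, hv⟩ := hc x y r hq
    refine ⟨c, ?_, hc⟩
    simp only [nimBbody, if_neg h0, if_neg h1, hq]
    rw [hv]

theorem nimB_sim (f : Nat) : ∀ (k : Nat) (x y : Int) (c : PySem.Dict (Int × Int) Int),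
    CacheOK c → 0 ≤ x → 0 ≤ y → x < 2 ^ 2 ^ k → y < 2 ^ 2 ^ k → k + 1 ≤ f →
    ∃ c', nimB f c x y = some (nim_mul x y, c') ∧ CacheOK c' := by
  induction f with
  | zero => intro k x y c _ _ _ _ _ hf; omega
  | succ f ih =>
    intro k x y c hc hx hy hxk hyk hf
    have hg : ∀ k', k' < k → ∀ c' a b, CacheOK c' → 0 ≤ a → 0 ≤ b →
        a < 2 ^ 2 ^ k' → b < 2 ^ 2 ^ k' →
        ∃ c'', nimB f c' a b = some (nim_mul a b, c'') ∧ CacheOK c'' :=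
      fun k' hk' c' a b hc' ha hb hak hbk => ih k' a b c' hc' ha hb hak hbk (by omega)
    simp only [nimB]
    split_ifs with hxy
    · obtain ⟨c', hrun, hc'⟩ := nimBbody_sim hg hc hy (le_of_lt hxy) hxk
      exact ⟨c', by rw [hrun, nim_mul_comm], hc'⟩
    · exact nimBbody_sim hg hc hx (not_lt.mp hxy) hyk

-- ===== VERDICT (by name: the statement is the Claim_ definition above) =====
theorem nim_mul_spec : Claim_equal_nim_mul := by
  intro x y _ hpre
  obtain ⟨hx, hy⟩ := hpre
  unfold Spec_nim_mul
  set k := x.natAbs + y.natAbs + 3 with hk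
  have hxk : x < 2 ^ 2 ^ k := pvSelfBound x y hx
  have hyk : y < 2 ^ 2 ^ k := by
    have := pvSelfBound y x hy
    rw [show y.natAbs + x.natAbs + 3 = k from by omega] at this
    exact this
  have hce : CacheOK PySem.Dict.empty := by
    intro a b v hv
    simp [PySem.Dict.get?_empty] at hv
  obtain ⟨c', hrun, _⟩ := nimB_sim (k + 1) k x y PySem.Dict.empty hce hx hy hxk hyk (le_refl _)
  unfold nim_mul_alt
  rw [show x.natAbs + y.natAbs + 4 = k + 1 from by omega, hrun]
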